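-- pv_equiv track=rewrite | github.com/Lauti-Tapia/bi-prueba | build_financials_table.py | formula_for_dollars
-- ===== SOURCE A (Python) =====
-- DEAL_REF = "COVER!$C$2"  # active deal filter
--
-- DEAL_COL = "_DealFinancial!$A:$A"   # Deal Name
--
-- CAT_COL  = "_DealFinancial!$E:$E"   # Category (ACT / UW)
--
-- ILI_COL  = "_DealFinancial!$H:$H"   # Internal Line Item
--
-- AMT_COL  = "_DealFinancial!$I:$I"   # Amount
--
-- def sumifs_item(item, category):
--     """SUMIFS for a single Internal Line Item, using direct ranges."""
--     return (
--         f'=SUMIFS({AMT_COL},'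
--         f'{DEAL_COL},{DEAL_REF},'
--         f'{CAT_COL},"{category}",'
--         f'{ILI_COL},"{item}")'
--     )
--
-- def sumifs_multi(items, category):
--     """SUMIFS over a list of Internal Line Items (wrapped in SUM for the array)."""
--     arr = "{" + ",".join(f'"{i}"' for i in items) + "}"
--     return (
--         f'=SUM(SUMIFS({AMT_COL},'
--         f'{DEAL_COL},{DEAL_REF},'
--         f'{CAT_COL},"{category}",'
--         f'{ILI_COL},{arr}))'
--     )
--
-- def formula_for_dollars(item_tag, category, row_map):
--     """Build the $ formula for a given layout row tag."""
--     if item_tag == "ADJ_GPR":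
--         return sumifs_multi(["Gross Potential Rent", "Loss to Lease"], category)
--     if item_tag == "EFF_RENTAL":
--         r_adj = row_map["ADJ_GPR"]
--         r_vac = row_map["Vacancy"]
--         r_con = row_map["Concessions"]
--         r_bdl = row_map["Bad Debt Loss"]
--         col = "{COL}"
--         return f"={col}{r_adj}+{col}{r_vac}+{col}{r_con}+{col}{r_bdl}"
--     if item_tag == "EFF_GROSS_REV":
--         r_er = row_map["EFF_RENTAL"]
--         r_ui = row_map["Utility Income"]
--         r_oi = row_map["Other Income"]
--         col = "{COL}"
--         return f"={col}{r_er}+{col}{r_ui}+{col}{r_oi}"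
--     if item_tag == "TOTAL_CTRL":
--         items = ["General & Administrative", "Payroll", "Sales & Marketing",
--                  "Utilities", "Repairs & Maintenance", "Management Fee", "Turnover"]
--         rows = [row_map[i] for i in items]
--         col = "{COL}"
--         return "=" + "+".join(f"{col}{r}" for r in rows)
--     if item_tag == "TOTAL_OPEX":
--         r_tc = row_map["TOTAL_CTRL"]
--         r_pt = row_map["Property Taxes"]
--         r_in = row_map["Insurance"]
--         col = "{COL}"
--         return f"={col}{r_tc}+{col}{r_pt}+{col}{r_in}"
--     if item_tag == "NOI":
--         r_egr = row_map["EFF_GROSS_REV"]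
--         r_top = row_map["TOTAL_OPEX"]
--         col = "{COL}"
--         return f"={col}{r_egr}-{col}{r_top}"
--     if item_tag == "CASHFLOW":
--         r_noi = row_map["NOI"]
--         r_cap = row_map["CapEx Reserve"]
--         r_ds = row_map["Debt Service"]
--         col = "{COL}"
--         return f"={col}{r_noi}-{col}{r_cap}-{col}{r_ds}"
--     # plain data row — item_tag IS the Internal Line Item value
--     return sumifs_item(item_tag, category)
-- ===== SOURCE B (Python) =====
-- DEAL_REF = "COVER!$C$2"  # active deal filter
--
-- DEAL_COL = "_DealFinancial!$A:$A"   # Deal Name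
--
-- CAT_COL  = "_DealFinancial!$E:$E"   # Category (ACT / UW)
--
-- ILI_COL  = "_DealFinancial!$H:$H"   # Internal Line Item
--
-- AMT_COL  = "_DealFinancial!$I:$I"   # Amount
--
-- # one spec table replaces the six arithmetic branches: tag -> ordered (row key, sign)
-- TAG_SPEC = {
--     "EFF_RENTAL":    [("ADJ_GPR", "+"), ("Vacancy", "+"), ("Concessions", "+"), ("Bad Debt Loss", "+")],
--     "EFF_GROSS_REV": [("EFF_RENTAL", "+"), ("Utility Income", "+"), ("Other Income", "+")],
--     "TOTAL_CTRL":    [("General & Administrative", "+"), ("Payroll", "+"), ("Sales & Marketing", "+"),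
--                       ("Utilities", "+"), ("Repairs & Maintenance", "+"), ("Management Fee", "+"),
--                       ("Turnover", "+")],
--     "TOTAL_OPEX":    [("TOTAL_CTRL", "+"), ("Property Taxes", "+"), ("Insurance", "+")],
--     "NOI":           [("EFF_GROSS_REV", "+"), ("TOTAL_OPEX", "-")],
--     "CASHFLOW":      [("NOI", "+"), ("CapEx Reserve", "-"), ("Debt Service", "-")],
-- }
--
--
-- def formula_for_dollars(item_tag, category, row_map):
--     """Build the $ formula for a given layout row tag."""
--     if item_tag == "ADJ_GPR":
--         arr = "{" + ",".join('"' + i + '"' for i in ["Gross Potential Rent", "Loss to Lease"]) + "}"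
--         return ('=SUM(SUMIFS(' + AMT_COL + ',' + DEAL_COL + ',' + DEAL_REF + ','
--                 + CAT_COL + ',"' + category + '",' + ILI_COL + ',' + arr + '))')
--     spec = TAG_SPEC.get(item_tag)
--     if spec is None:
--         # plain data row — item_tag IS the Internal Line Item value
--         return ('=SUMIFS(' + AMT_COL + ',' + DEAL_COL + ',' + DEAL_REF + ','
--                 + CAT_COL + ',"' + category + '",' + ILI_COL + ',"' + item_tag + '")')
--     parts = []
--     for key, sign in spec:
--         parts.append((sign if parts else "") + "{COL}" + str(row_map[key]))
--     return "=" + "".join(parts)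
-- ===== Notes on version B (the rewrite author's own statement) =====
-- stated objective: simpler
-- what changed: The six hand-written arithmetic branches (EFF_RENTAL, EFF_GROSS_REV, TOTAL_CTRL, TOTAL_OPEX, NOI, CASHFLOW) are replaced by one TAG_SPEC table mapping each tag to ordered (row key, sign) pairs, consumed by a single accumulation loop; ADJ_GPR and the plain-data fallthrough keep their SUMIFS formatting.
import Mathlib
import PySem

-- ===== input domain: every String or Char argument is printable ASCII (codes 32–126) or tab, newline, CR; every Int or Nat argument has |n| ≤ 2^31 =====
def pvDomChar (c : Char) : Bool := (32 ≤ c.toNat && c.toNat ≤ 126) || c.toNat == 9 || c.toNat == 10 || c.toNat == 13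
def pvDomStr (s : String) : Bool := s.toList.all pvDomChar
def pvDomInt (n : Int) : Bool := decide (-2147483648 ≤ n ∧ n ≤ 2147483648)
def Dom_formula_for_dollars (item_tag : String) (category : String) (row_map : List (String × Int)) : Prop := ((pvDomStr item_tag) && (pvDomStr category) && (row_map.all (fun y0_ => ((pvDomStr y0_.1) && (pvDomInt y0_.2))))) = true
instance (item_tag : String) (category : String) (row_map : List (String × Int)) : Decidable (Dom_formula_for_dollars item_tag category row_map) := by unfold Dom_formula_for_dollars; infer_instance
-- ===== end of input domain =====

-- B replaces A's six hand-written arithmetic branches by one spec table (tag -> ordered (row key, sign) pairs)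
-- driven by a single accumulation loop; objective: simpler (no speed claim).


-- ===== PORT A =====
def pvDEAL_REF : String := "COVER!$C$2"
def pvDEAL_COL : String := "_DealFinancial!$A:$A"
def pvCAT_COL : String := "_DealFinancial!$E:$E"
def pvILI_COL : String := "_DealFinancial!$H:$H"
def pvAMT_COL : String := "_DealFinancial!$I:$I"

-- row_map[k] of the Python dict (first match); none = KeyError
def pvGet (row_map : List (String × Int)) (k : String) : Option Int :=
  (PySem.Dict.mk row_map).get? k

def sumifs_item (item : String) (category : String) : String :=
  "=SUMIFS(" ++ pvAMT_COL ++ "," ++ pvDEAL_COL ++ "," ++ pvDEAL_REF ++ ","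
    ++ pvCAT_COL ++ ",\"" ++ category ++ "\"," ++ pvILI_COL ++ ",\"" ++ item ++ "\")"

def sumifs_multi (items : List String) (category : String) : String :=
  let arr := "{" ++ PySem.Str.join "," (items.map (fun i => "\"" ++ i ++ "\"")) ++ "}"
  "=SUM(SUMIFS(" ++ pvAMT_COL ++ "," ++ pvDEAL_COL ++ "," ++ pvDEAL_REF ++ ","
    ++ pvCAT_COL ++ ",\"" ++ category ++ "\"," ++ pvILI_COL ++ "," ++ arr ++ "))"

-- literal transliteration of A; the "" result marks a KeyError (excluded by Pre_)
def formula_for_dollars (item_tag : String) (category : String) (row_map : List (String × Int)) : String :=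
  if item_tag = "ADJ_GPR" then
    sumifs_multi ["Gross Potential Rent", "Loss to Lease"] category
  else if item_tag = "EFF_RENTAL" then
    match pvGet row_map "ADJ_GPR", pvGet row_map "Vacancy",
          pvGet row_map "Concessions", pvGet row_map "Bad Debt Loss" with
    | some r_adj, some r_vac, some r_con, some r_bdl =>
        "=" ++ "{COL}" ++ PySem.Int.toStr r_adj ++ "+" ++ "{COL}" ++ PySem.Int.toStr r_vac
          ++ "+" ++ "{COL}" ++ PySem.Int.toStr r_con ++ "+" ++ "{COL}" ++ PySem.Int.toStr r_bdl
    | _, _, _, _ => ""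
  else if item_tag = "EFF_GROSS_REV" then
    match pvGet row_map "EFF_RENTAL", pvGet row_map "Utility Income", pvGet row_map "Other Income" with
    | some r_er, some r_ui, some r_oi =>
        "=" ++ "{COL}" ++ PySem.Int.toStr r_er ++ "+" ++ "{COL}" ++ PySem.Int.toStr r_ui
          ++ "+" ++ "{COL}" ++ PySem.Int.toStr r_oi
    | _, _, _ => ""
  else if item_tag = "TOTAL_CTRL" then
    match (["General & Administrative", "Payroll", "Sales & Marketing", "Utilities",
            "Repairs & Maintenance", "Management Fee", "Turnover"]).mapM (pvGet row_map) with
    | some rows => "=" ++ PySem.Str.join "+" (rows.map (fun r => "{COL}" ++ PySem.Int.toStr r))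
    | none => ""
  else if item_tag = "TOTAL_OPEX" then
    match pvGet row_map "TOTAL_CTRL", pvGet row_map "Property Taxes", pvGet row_map "Insurance" with
    | some r_tc, some r_pt, some r_in =>
        "=" ++ "{COL}" ++ PySem.Int.toStr r_tc ++ "+" ++ "{COL}" ++ PySem.Int.toStr r_pt
          ++ "+" ++ "{COL}" ++ PySem.Int.toStr r_in
    | _, _, _ => ""
  else if item_tag = "NOI" then
    match pvGet row_map "EFF_GROSS_REV", pvGet row_map "TOTAL_OPEX" with
    | some r_egr, some r_top =>
        "=" ++ "{COL}" ++ PySem.Int.toStr r_egr ++ "-" ++ "{COL}" ++ PySem.Int.toStr r_top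
    | _, _ => ""
  else if item_tag = "CASHFLOW" then
    match pvGet row_map "NOI", pvGet row_map "CapEx Reserve", pvGet row_map "Debt Service" with
    | some r_noi, some r_cap, some r_ds =>
        "=" ++ "{COL}" ++ PySem.Int.toStr r_noi ++ "-" ++ "{COL}" ++ PySem.Int.toStr r_cap
          ++ "-" ++ "{COL}" ++ PySem.Int.toStr r_ds
    | _, _, _ => ""
  else
    sumifs_item item_tag category

-- ===== PORT B =====
def pvTagSpec : PySem.Dict String (List (String × String)) :=
  PySem.Dict.ofList
    [("EFF_RENTAL", [("ADJ_GPR", "+"), ("Vacancy", "+"), ("Concessions", "+"), ("Bad Debt Loss", "+")]),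
     ("EFF_GROSS_REV", [("EFF_RENTAL", "+"), ("Utility Income", "+"), ("Other Income", "+")]),
     ("TOTAL_CTRL", [("General & Administrative", "+"), ("Payroll", "+"), ("Sales & Marketing", "+"),
                     ("Utilities", "+"), ("Repairs & Maintenance", "+"), ("Management Fee", "+"),
                     ("Turnover", "+")]),
     ("TOTAL_OPEX", [("TOTAL_CTRL", "+"), ("Property Taxes", "+"), ("Insurance", "+")]),
     ("NOI", [("EFF_GROSS_REV", "+"), ("TOTAL_OPEX", "-")]),
     ("CASHFLOW", [("NOI", "+"), ("CapEx Reserve", "-"), ("Debt Service", "-")])]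

-- Source B's accumulation loop over the spec (none = KeyError, excluded by Pre_)
def pvParts (row_map : List (String × Int)) : List (String × String) → List String → Option (List String)
  | [], parts => some parts
  | (key, sign) :: rest, parts =>
    match pvGet row_map key with
    | none => none
    | some r =>
        pvParts row_map rest
          (parts ++ [(if parts.isEmpty then "" else sign) ++ "{COL}" ++ PySem.Int.toStr r])

def formula_for_dollars_alt (item_tag : String) (category : String) (row_map : List (String × Int)) : String :=
  if item_tag = "ADJ_GPR" then
    let arr := "{" ++ PySem.Str.join ","
      ((["Gross Potential Rent", "Loss to Lease"]).map (fun i => "\"" ++ i ++ "\"")) ++ "}"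
    "=SUM(SUMIFS(" ++ pvAMT_COL ++ "," ++ pvDEAL_COL ++ "," ++ pvDEAL_REF ++ ","
      ++ pvCAT_COL ++ ",\"" ++ category ++ "\"," ++ pvILI_COL ++ "," ++ arr ++ "))"
  else
    match pvTagSpec.get? item_tag with
    | none =>
        "=SUMIFS(" ++ pvAMT_COL ++ "," ++ pvDEAL_COL ++ "," ++ pvDEAL_REF ++ ","
          ++ pvCAT_COL ++ ",\"" ++ category ++ "\"," ++ pvILI_COL ++ ",\"" ++ item_tag ++ "\")"
    | some spec =>
        match pvParts row_map spec [] with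
        | none => ""
        | some parts => "=" ++ PySem.Str.join "" parts

-- ===== PRECONDITION & SPEC =====
-- the row_map keys each tag's branch of the Python looks up (KeyError on a missing one)
def pvRequired (item_tag : String) : List String :=
  if item_tag = "EFF_RENTAL" then ["ADJ_GPR", "Vacancy", "Concessions", "Bad Debt Loss"]
  else if item_tag = "EFF_GROSS_REV" then ["EFF_RENTAL", "Utility Income", "Other Income"]
  else if item_tag = "TOTAL_CTRL" then
    ["General & Administrative", "Payroll", "Sales & Marketing", "Utilities",
     "Repairs & Maintenance", "Management Fee", "Turnover"]
  else if item_tag = "TOTAL_OPEX" then ["TOTAL_CTRL", "Property Taxes", "Insurance"]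
  else if item_tag = "NOI" then ["EFF_GROSS_REV", "TOTAL_OPEX"]
  else if item_tag = "CASHFLOW" then ["NOI", "CapEx Reserve", "Debt Service"]
  else []

-- Pre_ excludes exactly the inputs where Python A raises KeyError: a composite tag whose
-- required row_map keys are not all present.
def Pre_formula_for_dollars (item_tag : String) (category : String) (row_map : List (String × Int)) : Prop :=
  ∀ k ∈ pvRequired item_tag, ((PySem.Dict.mk row_map).get? k).isSome
instance (item_tag : String) (category : String) (row_map : List (String × Int)) : Decidable (Pre_formula_for_dollars item_tag category row_map) := by unfold Pre_formula_for_dollars; infer_instance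

def pvWitness_formula_for_dollars : String × String × (List (String × Int)) :=
  ("NOI", "ACT", [("EFF_GROSS_REV", 5), ("TOTAL_OPEX", 9)])

def Spec_formula_for_dollars (item_tag : String) (category : String) (row_map : List (String × Int)) (out : String) : Prop := out = formula_for_dollars_alt item_tag category row_map
instance (item_tag : String) (category : String) (row_map : List (String × Int)) (out : String) : Decidable (Spec_formula_for_dollars item_tag category row_map out) := by unfold Spec_formula_for_dollars; infer_instance

-- ===== CLAIM (what is proved, stated in full; the proofs are below) =====
def Claim_equal_formula_for_dollars : Prop := ∀ (item_tag : String) (category : String) (row_map : List (String × Int)), Dom_formula_for_dollars item_tag category row_map → Pre_formula_for_dollars item_tag category row_map → Spec_formula_for_dollars item_tag category row_map (formula_for_dollars item_tag category row_map)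

-- ===== LEMMAS AND PROOFS =====

-- ===== VERDICT (by name: the statement is the Claim_ definition above) =====

-- ===== VERDICT (by name: the statement is the Claim_ definition above) =====
theorem formula_for_dollars_spec : Claim_equal_formula_for_dollars := by
  intro t c m _ hpre
  unfold Spec_formula_for_dollars
  by_cases h1 : t = "ADJ_GPR"
  · subst h1
    apply String.toList_inj.mp
    simp only [formula_for_dollars, formula_for_dollars_alt, sumifs_multi,
      pvAMT_COL, pvDEAL_COL, pvDEAL_REF, pvCAT_COL, pvILI_COL]
    simp [PySem.Chars.join, List.intercalate, List.intersperse, List.append_assoc]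
  by_cases h2 : t = "EFF_RENTAL"
  · subst h2
    obtain ⟨r1, e1⟩ := Option.isSome_iff_exists.mp (hpre "ADJ_GPR" (by decide))
    obtain ⟨r2, e2⟩ := Option.isSome_iff_exists.mp (hpre "Vacancy" (by decide))
    obtain ⟨r3, e3⟩ := Option.isSome_iff_exists.mp (hpre "Concessions" (by decide))
    obtain ⟨r4, e4⟩ := Option.isSome_iff_exists.mp (hpre "Bad Debt Loss" (by decide))
    simp only [formula_for_dollars, formula_for_dollars_alt, pvGet, pvParts,
      show pvTagSpec.get? "EFF_RENTAL" = some [("ADJ_GPR", "+"), ("Vacancy", "+"), ("Concessions", "+"), ("Bad Debt Loss", "+")] from rfl,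
      e1, e2, e3, e4, List.mapM_cons, List.mapM_nil, Option.bind_eq_bind, Option.bind_some, Option.pure_def]
    apply String.toList_inj.mp
    simp [PySem.Chars.join, List.intercalate, List.intersperse, List.append_assoc]
  by_cases h3 : t = "EFF_GROSS_REV"
  · subst h3
    obtain ⟨r1, e1⟩ := Option.isSome_iff_exists.mp (hpre "EFF_RENTAL" (by decide))
    obtain ⟨r2, e2⟩ := Option.isSome_iff_exists.mp (hpre "Utility Income" (by decide))
    obtain ⟨r3, e3⟩ := Option.isSome_iff_exists.mp (hpre "Other Income" (by decide))
    simp only [formula_for_dollars, formula_for_dollars_alt, pvGet, pvParts,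
      show pvTagSpec.get? "EFF_GROSS_REV" = some [("EFF_RENTAL", "+"), ("Utility Income", "+"), ("Other Income", "+")] from rfl,
      e1, e2, e3, List.mapM_cons, List.mapM_nil, Option.bind_eq_bind, Option.bind_some, Option.pure_def]
    apply String.toList_inj.mp
    simp [PySem.Chars.join, List.intercalate, List.intersperse, List.append_assoc]
  by_cases h4 : t = "TOTAL_CTRL"
  · subst h4
    obtain ⟨r1, e1⟩ := Option.isSome_iff_exists.mp (hpre "General & Administrative" (by decide))
    obtain ⟨r2, e2⟩ := Option.isSome_iff_exists.mp (hpre "Payroll" (by decide))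
    obtain ⟨r3, e3⟩ := Option.isSome_iff_exists.mp (hpre "Sales & Marketing" (by decide))
    obtain ⟨r4, e4⟩ := Option.isSome_iff_exists.mp (hpre "Utilities" (by decide))
    obtain ⟨r5, e5⟩ := Option.isSome_iff_exists.mp (hpre "Repairs & Maintenance" (by decide))
    obtain ⟨r6, e6⟩ := Option.isSome_iff_exists.mp (hpre "Management Fee" (by decide))
    obtain ⟨r7, e7⟩ := Option.isSome_iff_exists.mp (hpre "Turnover" (by decide))
    simp only [formula_for_dollars, formula_for_dollars_alt, pvGet, pvParts,
      show pvTagSpec.get? "TOTAL_CTRL" = some [("General & Administrative", "+"), ("Payroll", "+"), ("Sales & Marketing", "+"), ("Utilities", "+"), ("Repairs & Maintenance", "+"), ("Management Fee", "+"), ("Turnover", "+")] from rfl,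
      e1, e2, e3, e4, e5, e6, e7, List.mapM_cons, List.mapM_nil, Option.bind_eq_bind, Option.bind_some, Option.pure_def]
    apply String.toList_inj.mp
    simp [PySem.Chars.join, List.intercalate, List.intersperse]
  by_cases h5 : t = "TOTAL_OPEX"
  · subst h5
    obtain ⟨r1, e1⟩ := Option.isSome_iff_exists.mp (hpre "TOTAL_CTRL" (by decide))
    obtain ⟨r2, e2⟩ := Option.isSome_iff_exists.mp (hpre "Property Taxes" (by decide))
    obtain ⟨r3, e3⟩ := Option.isSome_iff_exists.mp (hpre "Insurance" (by decide))
    simp only [formula_for_dollars, formula_for_dollars_alt, pvGet, pvParts,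
      show pvTagSpec.get? "TOTAL_OPEX" = some [("TOTAL_CTRL", "+"), ("Property Taxes", "+"), ("Insurance", "+")] from rfl,
      e1, e2, e3, List.mapM_cons, List.mapM_nil, Option.bind_eq_bind, Option.bind_some, Option.pure_def]
    apply String.toList_inj.mp
    simp [PySem.Chars.join, List.intercalate, List.intersperse, List.append_assoc]
  by_cases h6 : t = "NOI"
  · subst h6
    obtain ⟨r1, e1⟩ := Option.isSome_iff_exists.mp (hpre "EFF_GROSS_REV" (by decide))
    obtain ⟨r2, e2⟩ := Option.isSome_iff_exists.mp (hpre "TOTAL_OPEX" (by decide))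
    simp only [formula_for_dollars, formula_for_dollars_alt, pvGet, pvParts,
      show pvTagSpec.get? "NOI" = some [("EFF_GROSS_REV", "+"), ("TOTAL_OPEX", "-")] from rfl,
      e1, e2, List.mapM_cons, List.mapM_nil, Option.bind_eq_bind, Option.bind_some, Option.pure_def]
    apply String.toList_inj.mp
    simp [PySem.Chars.join, List.intercalate, List.intersperse, List.append_assoc]
  by_cases h7 : t = "CASHFLOW"
  · subst h7
    obtain ⟨r1, e1⟩ := Option.isSome_iff_exists.mp (hpre "NOI" (by decide))
    obtain ⟨r2, e2⟩ := Option.isSome_iff_exists.mp (hpre "CapEx Reserve" (by decide))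
    obtain ⟨r3, e3⟩ := Option.isSome_iff_exists.mp (hpre "Debt Service" (by decide))
    simp only [formula_for_dollars, formula_for_dollars_alt, pvGet, pvParts,
      show pvTagSpec.get? "CASHFLOW" = some [("NOI", "+"), ("CapEx Reserve", "-"), ("Debt Service", "-")] from rfl,
      e1, e2, e3, List.mapM_cons, List.mapM_nil, Option.bind_eq_bind, Option.bind_some, Option.pure_def]
    apply String.toList_inj.mp
    simp [PySem.Chars.join, List.intercalate, List.intersperse, List.append_assoc]
  -- plain data row: no composite tag matches, so the spec table has no entry
  have hnone : pvTagSpec.get? t = none := by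
    rw [PySem.Dict.get?_eq_none_iff_not_mem_keys]
    intro hm
    simp only [show pvTagSpec.keys = ["EFF_RENTAL", "EFF_GROSS_REV", "TOTAL_CTRL", "TOTAL_OPEX",
      "NOI", "CASHFLOW"] from rfl, List.mem_cons, List.not_mem_nil, or_false] at hm
    rcases hm with h | h | h | h | h | h <;> simp_all
  simp only [formula_for_dollars, formula_for_dollars_alt, sumifs_item, hnone,
    h1, h2, h3, h4, h5, h6, h7, if_false]
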